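-- pv_equiv track=rewrite | github.com/AlessandroM24/April-2024-Python-test | ESERCIZI/ESERCIZIO_4/ESERCIZIO_4.py | num_pari
-- ===== SOURCE A (Python) =====
-- def num_pari(lista_numeri, quantita_pari):
--     lista_numeri_invertita = lista_numeri[::-1]
--     numeri_pari_presi = 0
--     lista_numeri_pari = []
--
--     for numero in lista_numeri_invertita:
--         if numero % 2 == 0:
--             lista_numeri_pari.append(numero)
--             numeri_pari_presi += 1
--             if numeri_pari_presi == quantita_pari:
--                 break
--     lista_numeri_pari = lista_numeri_pari[::-1]
--     return lista_numeri_pari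
-- ===== SOURCE B (Python) =====
-- def num_pari(lista_numeri, quantita_pari):
--     evens = [n for n in lista_numeri if n % 2 == 0]
--     if quantita_pari > 0:
--         return evens[-quantita_pari:]
--     return evens
-- ===== Notes on version B (the rewrite author's own statement) =====
-- stated objective: simpler
-- what changed: B replaces A's double reversal with break/counter loop by one forward filter pass plus a single tail slice (evens[-q:] when q > 0, all evens otherwise).
import Mathlib
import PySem

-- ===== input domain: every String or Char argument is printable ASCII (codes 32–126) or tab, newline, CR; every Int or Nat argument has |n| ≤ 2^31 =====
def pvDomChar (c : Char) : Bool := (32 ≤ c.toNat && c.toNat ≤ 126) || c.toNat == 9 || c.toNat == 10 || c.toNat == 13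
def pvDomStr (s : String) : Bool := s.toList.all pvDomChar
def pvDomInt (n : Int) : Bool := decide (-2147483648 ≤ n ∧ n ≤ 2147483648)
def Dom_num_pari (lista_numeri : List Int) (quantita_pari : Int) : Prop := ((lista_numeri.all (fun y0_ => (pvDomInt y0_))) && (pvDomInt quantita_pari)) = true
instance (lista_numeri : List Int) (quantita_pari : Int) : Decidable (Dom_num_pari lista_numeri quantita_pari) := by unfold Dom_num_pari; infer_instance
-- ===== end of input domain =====

-- B replaces A's reverse+counter+break loop+reverse by one forward filter pass and a tail slice (simpler decomposition).


-- ===== PORT A =====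
-- A's for-loop with counter and break; lista[::-1] is List.reverse (PySem.List.slice?_none_none_neg_one).
def numPariLoop (quantita_pari : Int) : List Int → Int → List Int → List Int
  | [], _, acc => acc
  | numero :: rest, presi, acc =>
    if PySem.Int.mod numero 2 == 0 then
      let acc' := acc ++ [numero]
      let presi' := presi + 1
      if presi' == quantita_pari then acc' else numPariLoop quantita_pari rest presi' acc'
    else numPariLoop quantita_pari rest presi acc

def num_pari (lista_numeri : List Int) (quantita_pari : Int) : List Int :=
  (numPariLoop quantita_pari lista_numeri.reverse 0 []).reverse

-- ===== PORT B =====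
def num_pari_alt (lista_numeri : List Int) (quantita_pari : Int) : List Int :=
  let evens := lista_numeri.filter (fun n => PySem.Int.mod n 2 == 0)
  if quantita_pari > 0 then PySem.List.slice evens (some (-quantita_pari)) none else evens

-- ===== PRECONDITION & SPEC =====
def Spec_num_pari (lista_numeri : List Int) (quantita_pari : Int) (out : List Int) : Prop := out = num_pari_alt lista_numeri quantita_pari
instance (lista_numeri : List Int) (quantita_pari : Int) (out : List Int) : Decidable (Spec_num_pari lista_numeri quantita_pari out) := by unfold Spec_num_pari; infer_instance

-- ===== CLAIM (what is proved, stated in full; the proofs are below) =====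
def Claim_equal_num_pari : Prop := ∀ (lista_numeri : List Int) (quantita_pari : Int), Dom_num_pari lista_numeri quantita_pari → Spec_num_pari lista_numeri quantita_pari (num_pari lista_numeri quantita_pari)

-- ===== LEMMAS AND PROOFS =====

-- With a nonpositive quota the break test (presi+1 == q) never fires from a nonneg counter: the loop appends every even.
lemma numPariLoop_nonpos (q : Int) (hq : q ≤ 0) (xs : List Int) (presi : Int) (hp : 0 ≤ presi) (acc : List Int) :
    numPariLoop q xs presi acc = acc ++ xs.filter (fun n => PySem.Int.mod n 2 == 0) := by
  induction xs generalizing presi acc with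
  | nil => simp [numPariLoop]
  | cons n rest ih =>
    by_cases h : 2 ∣ n
    · have hne : (presi + 1 == q) = false := by simp; omega
      simp [numPariLoop, h, hne, ih (presi + 1) (by omega)]
    · simp [numPariLoop, h, ih presi hp]

-- With 0 ≤ presi < q the loop appends the next (q - presi) evens (or all of them).
lemma numPariLoop_pos (q : Int) (xs : List Int) (presi : Int) (hp : 0 ≤ presi) (hlt : presi < q) (acc : List Int) :
    numPariLoop q xs presi acc = acc ++ (xs.filter (fun n => PySem.Int.mod n 2 == 0)).take (q - presi).toNat := by
  induction xs generalizing presi acc with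
  | nil => simp [numPariLoop]
  | cons n rest ih =>
    by_cases h : 2 ∣ n
    · by_cases he : presi + 1 = q
      · have h1 : (q - presi).toNat = 1 := by omega
        simp [numPariLoop, h, he, h1]
      · have hne : (presi + 1 == q) = false := by simp [he]
        have h2 : (q - presi).toNat = (q - (presi + 1)).toNat + 1 := by omega
        simp [numPariLoop, h, hne, ih (presi + 1) (by omega) (by omega), h2]
    · simp [numPariLoop, h, ih presi hp hlt]

-- ===== VERDICT (by name: the statement is the Claim_ definition above) =====
theorem num_pari_spec : Claim_equal_num_pari := by
  intro l q _
  unfold Spec_num_pari num_pari num_pari_alt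
  by_cases hq : q > 0
  · rw [numPariLoop_pos q l.reverse 0 le_rfl hq []]
    have hk : -q = -((q.toNat : Nat) : Int) := by omega
    rw [if_pos hq, hk, PySem.List.slice_from_neg_natCast _ _ (by omega)]
    simp [List.filter_reverse, List.take_reverse]
  · rw [numPariLoop_nonpos q (by omega) l.reverse 0 le_rfl []]
    simp [List.filter_reverse, hq]
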